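-- pv_equiv track=rewrite | github.com/naturallanguagepuzzling/blog | 2021-01-17-landmark_states_element.py | find_solutions
-- ===== SOURCE A (Python) =====
-- def get_comparison_string(some_list):
--     cs = "".join(some_list)
--     cs = [d.lower() for d in cs if d.isalpha()]
--     cs.sort()
--     cs = "".join(cs)
--     return cs
--
-- def find_solutions(some_state_pairs, some_ld_el_pairs):
--     solutions = []
--     for sp in some_state_pairs:
--         sp_str = get_comparison_string(sp)
--         for lp in some_ld_el_pairs:
--             lp_str = get_comparison_string(lp)
--             if sp_str == lp_str:
--                 solutions.append([sp, lp])
--             else: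
--                 pass
--     return solutions
-- ===== SOURCE B (Python) =====
-- def get_comparison_string(some_list):
--     cs = "".join(some_list)
--     cs = [d.lower() for d in cs if d.isalpha()]
--     cs.sort()
--     cs = "".join(cs)
--     return cs
--
-- def find_solutions(some_state_pairs, some_ld_el_pairs):
--     # Group the lp's by their comparison string once, then one lookup per sp.
--     groups = {}
--     for lp in some_ld_el_pairs:
--         groups.setdefault(get_comparison_string(lp), []).append(lp)
--     return [[sp, lp]
--             for sp in some_state_pairs
--             for lp in groups.get(get_comparison_string(sp), [])]
-- ===== Notes on version B (the rewrite author's own statement) =====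
-- stated objective: faster
-- what changed: Instead of recomputing each landmark pair's comparison string inside a nested scan, B builds a hash map from comparison string to the list of landmark pairs in one pass and answers each state pair with one lookup.
import Mathlib
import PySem

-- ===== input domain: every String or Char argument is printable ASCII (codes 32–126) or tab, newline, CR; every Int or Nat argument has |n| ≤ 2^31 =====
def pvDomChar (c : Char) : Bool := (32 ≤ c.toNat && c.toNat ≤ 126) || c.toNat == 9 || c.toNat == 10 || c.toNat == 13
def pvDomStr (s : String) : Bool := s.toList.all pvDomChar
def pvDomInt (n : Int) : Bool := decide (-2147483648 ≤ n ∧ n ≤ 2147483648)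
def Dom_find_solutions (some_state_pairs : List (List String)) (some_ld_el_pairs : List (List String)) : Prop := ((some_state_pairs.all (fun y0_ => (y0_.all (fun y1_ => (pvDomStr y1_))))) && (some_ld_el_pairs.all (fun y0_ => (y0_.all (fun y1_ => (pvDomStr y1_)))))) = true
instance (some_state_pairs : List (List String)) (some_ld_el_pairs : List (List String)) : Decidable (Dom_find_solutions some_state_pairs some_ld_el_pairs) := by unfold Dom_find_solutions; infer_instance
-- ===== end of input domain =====

-- B groups the landmark/element pairs by comparison string in a dict built once, then answers each
-- state pair with a single lookup (asymptotically faster than A's nested rescans).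


-- ===== PORT A =====
-- get_comparison_string: "".join, filter isalpha + lower, sort, "".join.  Returned as the
-- sorted List Char (the final "".join only wraps these chars into a string; equality of the
-- joined strings is equality of these char lists).  Shared helper of both Python files.
def get_comparison_string (some_list : List String) : List Char :=
  let cs := PySem.Chars.join [] (some_list.map String.toList)
  let cs2 := (cs.filter (fun d => PySem.Chars.isalpha d)).map (fun d => PySem.Chars.lowerChar d)
  PySem.List.sorted cs2 (fun x => x) false

def find_solutions (some_state_pairs : List (List String)) (some_ld_el_pairs : List (List String)) : List (List (List String)) :=
  some_state_pairs.foldl (fun solutions sp =>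
    let sp_str := get_comparison_string sp
    some_ld_el_pairs.foldl (fun solutions lp =>
      let lp_str := get_comparison_string lp
      if sp_str == lp_str then solutions ++ [[sp, lp]] else solutions) solutions) []

-- ===== PORT B =====
def find_solutions_alt (some_state_pairs : List (List String)) (some_ld_el_pairs : List (List String)) : List (List (List String)) :=
  let groups := some_ld_el_pairs.foldl
    (fun d lp => d.modify (get_comparison_string lp) [] (· ++ [lp])) PySem.Dict.empty
  some_state_pairs.flatMap (fun sp =>
    (groups.getD (get_comparison_string sp) []).map (fun lp => [sp, lp]))

-- ===== PRECONDITION & SPEC =====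
def Spec_find_solutions (some_state_pairs : List (List String)) (some_ld_el_pairs : List (List String)) (out : List (List (List String))) : Prop := out = find_solutions_alt some_state_pairs some_ld_el_pairs
instance (some_state_pairs : List (List String)) (some_ld_el_pairs : List (List String)) (out : List (List (List String))) : Decidable (Spec_find_solutions some_state_pairs some_ld_el_pairs out) := by unfold Spec_find_solutions; infer_instance

-- ===== CLAIM (what is proved, stated in full; the proofs are below) =====
def Claim_equal_find_solutions : Prop := ∀ (some_state_pairs : List (List String)) (some_ld_el_pairs : List (List String)), Dom_find_solutions some_state_pairs some_ld_el_pairs → Spec_find_solutions some_state_pairs some_ld_el_pairs (find_solutions some_state_pairs some_ld_el_pairs)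

-- ===== LEMMAS AND PROOFS =====

-- B's dict lookup for a state pair yields exactly the landmark pairs A's inner scan keeps.
theorem groups_getD (lps : List (List String)) (c : List Char) :
    ((lps.foldl (fun d lp => d.modify (get_comparison_string lp) [] (· ++ [lp]))
        PySem.Dict.empty).getD c [])
      = lps.filter (fun lp => c == get_comparison_string lp) := by
  have h := PySem.Dict.getD_foldl_modify_append
    (l := lps.map (fun lp => (get_comparison_string lp, lp))) (d := PySem.Dict.empty) (c := c)
  rw [List.foldl_map] at h
  rw [h]
  simp [List.filter_map, List.map_map, Function.comp_def,
    PySem.Dict.getD, PySem.Dict.empty, PySem.Dict.get?]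
  exact List.filter_congr fun lp _ => BEq.comm

-- ===== VERDICT (by name: the statement is the Claim_ definition above) =====
theorem find_solutions_spec : Claim_equal_find_solutions := by
  intro sps lps _
  unfold Spec_find_solutions find_solutions find_solutions_alt
  simp only [groups_getD]
  have hfun : (fun (solutions : List (List (List String))) sp =>
      lps.foldl (fun solutions lp =>
        if get_comparison_string sp == get_comparison_string lp then solutions ++ [[sp, lp]]
        else solutions) solutions)
      = fun solutions sp => solutions ++
        (lps.filter (fun lp => get_comparison_string sp == get_comparison_string lp)).map
          (fun lp => [sp, lp]) := by
    funext solutions sp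
    exact PySem.List.foldl_append_if _ _ lps solutions
  rw [hfun, PySem.List.foldl_append_eq_flatMap]
  simp
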